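-- pv_equiv track=rewrite | github.com/pypi-data/pypi-mirror-384 | packages/ibm-watsonx-orchestrate/ibm_watsonx_orchestrate-1.13.0.tar.gz/ibm_watsonx_orchestrate-1.13.0/src/ibm_watsonx_orchestrate/utils/utils.py | parse_bool_safe
-- ===== SOURCE A (Python) =====
-- def parse_bool_safe (value, fallback = False) -> bool:
--     if value is not None:
--         if isinstance(value, bool):
--             return value
--
--         elif isinstance(value, str):
--             value = value.lower().strip()
--             if value in ("yes", "true", "t", "1"):
--                 return True
--
--             elif value in ("no", "false", "f", "0"):
--                 return False
--
--         elif value in (0, 1):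
--             return parse_bool_safe(str(value), fallback)
--
--     return fallback
-- ===== SOURCE B (Python) =====
-- # B recognizes the boolean tokens with a table-driven finite automaton (a trie
-- # flattened into a transition table), scanning the normalized token one
-- # character at a time instead of testing membership in literal tuples.
--
-- _DELTA = {(0, 'y'): 1, (1, 'e'): 2, (2, 's'): 3,
--           (0, 't'): 4, (4, 'r'): 5, (5, 'u'): 6, (6, 'e'): 7,
--           (0, '1'): 8,
--           (0, 'n'): 9, (9, 'o'): 10,
--           (0, 'f'): 11, (11, 'a'): 12, (12, 'l'): 13, (13, 's'): 14, (14, 'e'): 15,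
--           (0, '0'): 16}
--
-- _ACCEPT = {3: True, 4: True, 7: True, 8: True,
--            10: False, 11: False, 15: False, 16: False}
--
--
-- def parse_bool_safe(value, fallback=False) -> bool:
--     if isinstance(value, bool):
--         return value
--     if isinstance(value, str):
--         token = value.strip().lower()
--     elif value is not None and value in (0, 1):
--         token = str(value)
--     else:
--         return fallback
--     state = 0
--     for ch in token:
--         state = _DELTA.get((state, ch), -1)
--         if state < 0:
--             return fallback
--     return _ACCEPT.get(state, fallback)
-- ===== Notes on version B (the rewrite author's own statement) =====
-- stated objective: alternative
-- what changed: Replaces the recursive call and the two literal-tuple membership tests by a table-driven finite automaton (a trie of the eight tokens flattened into a transition table) that scans the normalized token one character at a time with early exit on the dead state.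
import Mathlib
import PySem

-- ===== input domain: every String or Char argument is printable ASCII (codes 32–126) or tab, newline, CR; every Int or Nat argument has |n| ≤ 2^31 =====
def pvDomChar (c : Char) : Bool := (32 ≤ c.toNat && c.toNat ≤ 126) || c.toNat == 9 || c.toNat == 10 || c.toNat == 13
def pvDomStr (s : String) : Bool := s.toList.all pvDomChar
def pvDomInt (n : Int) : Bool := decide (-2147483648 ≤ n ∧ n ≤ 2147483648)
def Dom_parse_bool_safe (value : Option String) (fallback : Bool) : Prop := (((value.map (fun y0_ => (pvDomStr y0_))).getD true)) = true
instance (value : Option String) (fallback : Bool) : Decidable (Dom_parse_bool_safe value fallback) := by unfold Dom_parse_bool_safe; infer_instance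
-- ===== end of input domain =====

-- B replaces A's tuple-membership tests by a table-driven finite automaton (a trie flattened into a transition table) scanned once over the token; alternative decomposition, same cost.


-- ===== PORT A =====
-- A on the Option String domain: None → fallback; a string is lowered then stripped and
-- tested against the two tuples in order; the bool/int branches are unreachable here.
def parse_bool_safe (value : Option String) (fallback : Bool) : Bool :=
  match value with
  | none => fallback
  | some s =>
    let v := PySem.Str.strip (PySem.Str.lower s)
    if v = "yes" ∨ v = "true" ∨ v = "t" ∨ v = "1" then true
    else if v = "no" ∨ v = "false" ∨ v = "f" ∨ v = "0" then false
    else fallback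

-- ===== PORT B =====
-- the transition table _DELTA of Source B: dict lookup keyed by (state, char), default -1
def pvDelta (st : Int) (c : Char) : Int :=
  if st = 0 then
    (if c = 'y' then 1 else if c = 't' then 4 else if c = '1' then 8
     else if c = 'n' then 9 else if c = 'f' then 11 else if c = '0' then 16 else -1)
  else if st = 1 then (if c = 'e' then 2 else -1)
  else if st = 2 then (if c = 's' then 3 else -1)
  else if st = 4 then (if c = 'r' then 5 else -1)
  else if st = 5 then (if c = 'u' then 6 else -1)
  else if st = 6 then (if c = 'e' then 7 else -1)
  else if st = 9 then (if c = 'o' then 10 else -1)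
  else if st = 11 then (if c = 'a' then 12 else -1)
  else if st = 12 then (if c = 'l' then 13 else -1)
  else if st = 13 then (if c = 's' then 14 else -1)
  else if st = 14 then (if c = 'e' then 15 else -1)
  else -1

-- the accepting-state table _ACCEPT of Source B, default fallback
def pvAccept (st : Int) (fallback : Bool) : Bool :=
  if st = 3 ∨ st = 4 ∨ st = 7 ∨ st = 8 then true
  else if st = 10 ∨ st = 11 ∨ st = 15 ∨ st = 16 then false
  else fallback

-- the character loop of Source B: step the automaton, early-return fallback on the dead state
def pvRun (st : Int) (cs : List Char) (fallback : Bool) : Bool :=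
  match cs with
  | [] => pvAccept st fallback
  | c :: rest =>
    let st' := pvDelta st c
    if st' < 0 then fallback else pvRun st' rest fallback

def parse_bool_safe_alt (value : Option String) (fallback : Bool) : Bool :=
  match value with
  | none => fallback
  | some s =>
    let token := PySem.Str.lower (PySem.Str.strip s)
    pvRun 0 token.toList fallback

-- ===== PRECONDITION & SPEC =====
def Spec_parse_bool_safe (value : Option String) (fallback : Bool) (out : Bool) : Prop := out = parse_bool_safe_alt value fallback
instance (value : Option String) (fallback : Bool) (out : Bool) : Decidable (Spec_parse_bool_safe value fallback out) := by unfold Spec_parse_bool_safe; infer_instance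

-- ===== CLAIM (what is proved, stated in full; the proofs are below) =====
def Claim_equal_parse_bool_safe : Prop := ∀ (value : Option String) (fallback : Bool), Dom_parse_bool_safe value fallback → Spec_parse_bool_safe value fallback (parse_bool_safe value fallback)

-- ===== LEMMAS AND PROOFS =====

-- lowering a character never changes whether it is whitespace
theorem pv_isspace_false (d : Char) (hlo : 65 ≤ d.toNat) (hhi : d.toNat ≤ 122) :
    PySem.Chars.isspace d = false := by
  simp [PySem.Chars.isspace]
  omega

theorem pv_isspace_lowerChar (c : Char) :
    PySem.Chars.isspace (PySem.Chars.lowerChar c) = PySem.Chars.isspace c := by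
  unfold PySem.Chars.lowerChar
  split_ifs with h
  · have hb : (65 ≤ c.toNat ∧ c.toNat ≤ 90) := by
      simpa [PySem.Chars.isupper, Char.le_def] using h
    have hv : Nat.isValidChar (c.toNat + 32) := by
      left; omega
    have ht : (Char.ofNat (c.toNat + 32)).toNat = c.toNat + 32 :=
      by simpa [hv] using Char.toNat_ofNat (c.toNat + 32)
    rw [pv_isspace_false _ (by omega) (by omega),
        pv_isspace_false c (by omega) (by omega)]
  · rfl

theorem pv_isspace_comp :
    (PySem.Chars.isspace ∘ PySem.Chars.lowerChar) = PySem.Chars.isspace :=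
  funext pv_isspace_lowerChar

theorem pv_lstrip_lower (l : List Char) :
    PySem.Chars.lstrip (PySem.Chars.lower l) = PySem.Chars.lower (PySem.Chars.lstrip l) := by
  simp [PySem.Chars.lstrip, PySem.Chars.lower, List.dropWhile_map, pv_isspace_comp]

theorem pv_rstrip_lower (l : List Char) :
    PySem.Chars.rstrip (PySem.Chars.lower l) = PySem.Chars.lower (PySem.Chars.rstrip l) := by
  simp [PySem.Chars.rstrip, PySem.Chars.lower, List.dropWhile_map, ← List.map_reverse,
        pv_isspace_comp]

theorem pv_strip_lower (l : List Char) :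
    PySem.Chars.strip (PySem.Chars.lower l) = PySem.Chars.lower (PySem.Chars.strip l) := by
  simp [PySem.Chars.strip, pv_lstrip_lower, pv_rstrip_lower]

-- on Strings: lower-then-strip equals strip-then-lower
theorem pv_str_strip_lower (s : String) :
    PySem.Str.strip (PySem.Str.lower s) = PySem.Str.lower (PySem.Str.strip s) := by
  unfold PySem.Str.strip PySem.Str.lower
  simp [pv_strip_lower]

-- behaviour of the automaton started in each live state
theorem pv_run3 (l : List Char) (fb : Bool) : pvRun 3 l fb = if l = [] then true else fb := by
  cases l with
  | nil => simp [pvRun, pvAccept]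
  | cons c t => simp [pvRun, pvDelta]

theorem pv_run2 (l : List Char) (fb : Bool) : pvRun 2 l fb = if l = ['s'] then true else fb := by
  cases l with
  | nil => simp [pvRun, pvAccept]
  | cons c t =>
    by_cases hc : c = 's'
    · subst hc; simp [pvRun, pvDelta, pv_run3]
    · simp [pvRun, pvDelta, hc]

theorem pv_run1 (l : List Char) (fb : Bool) : pvRun 1 l fb = if l = ['e', 's'] then true else fb := by
  cases l with
  | nil => simp [pvRun, pvAccept]
  | cons c t =>
    by_cases hc : c = 'e'
    · subst hc; simp [pvRun, pvDelta, pv_run2]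
    · simp [pvRun, pvDelta, hc]

theorem pv_run7 (l : List Char) (fb : Bool) : pvRun 7 l fb = if l = [] then true else fb := by
  cases l with
  | nil => simp [pvRun, pvAccept]
  | cons c t => simp [pvRun, pvDelta]

theorem pv_run6 (l : List Char) (fb : Bool) : pvRun 6 l fb = if l = ['e'] then true else fb := by
  cases l with
  | nil => simp [pvRun, pvAccept]
  | cons c t =>
    by_cases hc : c = 'e'
    · subst hc; simp [pvRun, pvDelta, pv_run7]
    · simp [pvRun, pvDelta, hc]

theorem pv_run5 (l : List Char) (fb : Bool) : pvRun 5 l fb = if l = ['u', 'e'] then true else fb := by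
  cases l with
  | nil => simp [pvRun, pvAccept]
  | cons c t =>
    by_cases hc : c = 'u'
    · subst hc; simp [pvRun, pvDelta, pv_run6]
    · simp [pvRun, pvDelta, hc]

theorem pv_run4 (l : List Char) (fb : Bool) :
    pvRun 4 l fb = if l = [] ∨ l = ['r', 'u', 'e'] then true else fb := by
  cases l with
  | nil => simp [pvRun, pvAccept]
  | cons c t =>
    by_cases hc : c = 'r'
    · subst hc; simp [pvRun, pvDelta, pv_run5]
    · simp [pvRun, pvDelta, hc]

theorem pv_run8 (l : List Char) (fb : Bool) : pvRun 8 l fb = if l = [] then true else fb := by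
  cases l with
  | nil => simp [pvRun, pvAccept]
  | cons c t => simp [pvRun, pvDelta]

theorem pv_run10 (l : List Char) (fb : Bool) : pvRun 10 l fb = if l = [] then false else fb := by
  cases l with
  | nil => simp [pvRun, pvAccept]
  | cons c t => simp [pvRun, pvDelta]

theorem pv_run9 (l : List Char) (fb : Bool) : pvRun 9 l fb = if l = ['o'] then false else fb := by
  cases l with
  | nil => simp [pvRun, pvAccept]
  | cons c t =>
    by_cases hc : c = 'o'
    · subst hc; simp [pvRun, pvDelta, pv_run10]
    · simp [pvRun, pvDelta, hc]

theorem pv_run15 (l : List Char) (fb : Bool) : pvRun 15 l fb = if l = [] then false else fb := by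
  cases l with
  | nil => simp [pvRun, pvAccept]
  | cons c t => simp [pvRun, pvDelta]

theorem pv_run14 (l : List Char) (fb : Bool) : pvRun 14 l fb = if l = ['e'] then false else fb := by
  cases l with
  | nil => simp [pvRun, pvAccept]
  | cons c t =>
    by_cases hc : c = 'e'
    · subst hc; simp [pvRun, pvDelta, pv_run15]
    · simp [pvRun, pvDelta, hc]

theorem pv_run13 (l : List Char) (fb : Bool) : pvRun 13 l fb = if l = ['s', 'e'] then false else fb := by
  cases l with
  | nil => simp [pvRun, pvAccept]
  | cons c t =>
    by_cases hc : c = 's'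
    · subst hc; simp [pvRun, pvDelta, pv_run14]
    · simp [pvRun, pvDelta, hc]

theorem pv_run12 (l : List Char) (fb : Bool) : pvRun 12 l fb = if l = ['l', 's', 'e'] then false else fb := by
  cases l with
  | nil => simp [pvRun, pvAccept]
  | cons c t =>
    by_cases hc : c = 'l'
    · subst hc; simp [pvRun, pvDelta, pv_run13]
    · simp [pvRun, pvDelta, hc]

theorem pv_run11 (l : List Char) (fb : Bool) :
    pvRun 11 l fb = if l = [] ∨ l = ['a', 'l', 's', 'e'] then false else fb := by
  cases l with
  | nil => simp [pvRun, pvAccept]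
  | cons c t =>
    by_cases hc : c = 'a'
    · subst hc; simp [pvRun, pvDelta, pv_run12]
    · simp [pvRun, pvDelta, hc]

theorem pv_run16 (l : List Char) (fb : Bool) : pvRun 16 l fb = if l = [] then false else fb := by
  cases l with
  | nil => simp [pvRun, pvAccept]
  | cons c t => simp [pvRun, pvDelta]

-- the automaton from the start state recognizes exactly the eight tokens
theorem pv_run0 (l : List Char) (fb : Bool) :
    pvRun 0 l fb =
      if l = ['y','e','s'] ∨ l = ['t','r','u','e'] ∨ l = ['t'] ∨ l = ['1'] then true
      else if l = ['n','o'] ∨ l = ['f','a','l','s','e'] ∨ l = ['f'] ∨ l = ['0'] then false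
      else fb := by
  cases l with
  | nil => simp [pvRun, pvAccept]
  | cons c t =>
    by_cases h1 : c = 'y'
    · subst h1; simp [pvRun, pvDelta, pv_run1]
    by_cases h2 : c = 't'
    · subst h2; simp [pvRun, pvDelta, pv_run4, Bool.or_comm]
    by_cases h3 : c = '1'
    · subst h3; simp [pvRun, pvDelta, pv_run8]
    by_cases h4 : c = 'n'
    · subst h4; simp [pvRun, pvDelta, pv_run9]
    by_cases h5 : c = 'f'
    · subst h5; simp [pvRun, pvDelta, pv_run11, Bool.and_comm]
    by_cases h6 : c = '0'
    · subst h6; simp [pvRun, pvDelta, pv_run16]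
    simp [pvRun, pvDelta, h1, h2, h3, h4, h5, h6]

-- String equality against a literal reduces to equality of the character lists
theorem pv_str_eq_iff (v : String) (w : String) : v = w ↔ v.toList = w.toList := by
  constructor
  · intro h; rw [h]
  · intro h; exact String.ext (by simpa [String.toList] using h)

-- ===== VERDICT (by name: the statement is the Claim_ definition above) =====
theorem parse_bool_safe_spec : Claim_equal_parse_bool_safe := by
  intro value fallback _
  unfold Spec_parse_bool_safe parse_bool_safe parse_bool_safe_alt
  cases value with
  | none => rfl
  | some s =>
    simp only [pv_str_strip_lower, pv_run0]
    simp only [pv_str_eq_iff _ "yes", pv_str_eq_iff _ "true", pv_str_eq_iff _ "t",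
               pv_str_eq_iff _ "1", pv_str_eq_iff _ "no", pv_str_eq_iff _ "false",
               pv_str_eq_iff _ "f", pv_str_eq_iff _ "0"]
    rfl
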